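-- pv_equiv track=rewrite | github.com/Shashant7/timedtrading | scripts/reference-validation-matrix.py | classify_exit
-- ===== SOURCE A (Python) =====
-- from typing import Any, Dict, Iterable, List
--
-- def classify_exit(reason: Any) -> str:
--     s = str(reason or "").upper()
--     if "TP_FULL" in s:
--         return "tp_full"
--     if "FUSE" in s:
--         return "fuse"
--     if any(x in s for x in ("MAX_LOSS", "SL_BREACHED", "TRIGGER_BREACHED", "LARGE_ADVERSE_MOVE")):
--         return "loss_protect"
--     if "REGIME" in s:
--         return "regime_reversal"
--     if "TRIM" in s:
--         return "trim_related"
--     if not s: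
--         return "unknown"
--     return "other"
-- ===== SOURCE B (Python) =====
-- _KW = {
--     "TP_FULL": 0,
--     "FUSE": 1,
--     "MAX_LOSS": 2,
--     "SL_BREACHED": 2,
--     "TRIGGER_BREACHED": 2,
--     "LARGE_ADVERSE_MOVE": 2,
--     "REGIME": 3,
--     "TRIM": 4,
-- }
-- _CATS = ["tp_full", "fuse", "loss_protect", "regime_reversal", "trim_related"]
--
-- def classify_exit(reason):
--     s = str(reason or "").upper()
--     hits = [p for k, p in _KW.items() if k in s]
--     if hits:
--         return _CATS[min(hits)]
--     return "unknown" if not s else "other"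
-- ===== Notes on version B (the rewrite author's own statement) =====
-- stated objective: alternative
-- what changed: Instead of an ordered early-exit if-chain, B collects the priorities of ALL keywords occurring in the string via a keyword-to-priority dict and returns the category at the minimum priority, falling back to unknown/other.
import Mathlib
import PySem

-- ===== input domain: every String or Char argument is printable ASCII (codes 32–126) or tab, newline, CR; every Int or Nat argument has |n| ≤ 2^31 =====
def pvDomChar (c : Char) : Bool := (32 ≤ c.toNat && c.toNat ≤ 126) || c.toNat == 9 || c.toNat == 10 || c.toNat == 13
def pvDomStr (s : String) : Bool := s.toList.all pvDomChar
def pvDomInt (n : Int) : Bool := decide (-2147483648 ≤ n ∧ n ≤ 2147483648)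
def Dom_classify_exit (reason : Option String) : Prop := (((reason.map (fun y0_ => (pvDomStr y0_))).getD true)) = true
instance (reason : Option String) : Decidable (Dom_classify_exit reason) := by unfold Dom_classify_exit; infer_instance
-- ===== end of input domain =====

-- B replaces A's ordered early-exit if-chain by an aggregation: collect the priorities of
-- all keywords occurring in the string and return the category of the minimum priority.

-- ===== PORT A =====
def classify_exit (reason : Option String) : String :=
  -- s = str(reason or "").upper()   (None and "" both give "")
  let s := PySem.Str.upper (reason.getD "")
  if PySem.Str.isIn "TP_FULL" s then "tp_full"
  else if PySem.Str.isIn "FUSE" s then "fuse"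
  else if ["MAX_LOSS", "SL_BREACHED", "TRIGGER_BREACHED", "LARGE_ADVERSE_MOVE"].any
      (fun x => PySem.Str.isIn x s) then "loss_protect"
  else if PySem.Str.isIn "REGIME" s then "regime_reversal"
  else if PySem.Str.isIn "TRIM" s then "trim_related"
  else if s = "" then "unknown"
  else "other"

-- ===== PORT B =====
-- the _KW dict: keyword -> priority (insertion order)
def pvKw : List (String × Int) :=
  [("TP_FULL", 0), ("FUSE", 1), ("MAX_LOSS", 2), ("SL_BREACHED", 2),
   ("TRIGGER_BREACHED", 2), ("LARGE_ADVERSE_MOVE", 2), ("REGIME", 3), ("TRIM", 4)]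

def pvCats : List String := ["tp_full", "fuse", "loss_protect", "regime_reversal", "trim_related"]

def classify_exit_alt (reason : Option String) : String :=
  let s := PySem.Str.upper (reason.getD "")
  -- hits = [p for k, p in _KW.items() if k in s]
  let hits := (pvKw.filter (fun kp => PySem.Str.isIn kp.1 s)).map (fun kp => kp.2)
  -- if hits: return _CATS[min(hits)]
  match PySem.List.min? hits (fun p => p) with
  | some p => (PySem.List.pyGet? pvCats p).getD ""   -- index always in range (priorities 0..4)
  | none => if s = "" then "unknown" else "other"

-- ===== PRECONDITION & SPEC =====
def Spec_classify_exit (reason : Option String) (out : String) : Prop := out = classify_exit_alt reason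
instance (reason : Option String) (out : String) : Decidable (Spec_classify_exit reason out) := by unfold Spec_classify_exit; infer_instance

-- ===== CLAIM (what is proved, stated in full; the proofs are below) =====
def Claim_equal_classify_exit : Prop := ∀ (reason : Option String), Dom_classify_exit reason → Spec_classify_exit reason (classify_exit reason)

-- ===== LEMMAS AND PROOFS =====

-- ===== VERDICT (by name: the statement is the Claim_ definition above) =====
theorem classify_exit_spec : Claim_equal_classify_exit := by
  intro reason _
  unfold Spec_classify_exit classify_exit classify_exit_alt pvKw pvCats
  set s := PySem.Str.upper (reason.getD "") with hs
  simp only [List.any_cons, List.any_nil, Bool.or_false, List.filter_cons, List.filter_nil]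
  generalize PySem.Str.isIn "TP_FULL" s = b1
  generalize PySem.Str.isIn "FUSE" s = b2
  generalize PySem.Str.isIn "MAX_LOSS" s = b3
  generalize PySem.Str.isIn "SL_BREACHED" s = b4
  generalize PySem.Str.isIn "TRIGGER_BREACHED" s = b5
  generalize PySem.Str.isIn "LARGE_ADVERSE_MOVE" s = b6
  generalize PySem.Str.isIn "REGIME" s = b7
  generalize PySem.Str.isIn "TRIM" s = b8
  by_cases he : s = ""
  · simp only [if_pos he]
    revert b1 b2 b3 b4 b5 b6 b7 b8
    decide
  · simp only [if_neg he]
    revert b1 b2 b3 b4 b5 b6 b7 b8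
    decide
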